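-- pv_equiv track=rewrite | github.com/JRMurr/tix | scripts/gen_lib_stubs.py | translate_record_fields
-- ===== SOURCE A (Python) =====
-- def translate_record_fields(expr: str) -> str:
--     """Translate noogle record field syntax to .tix syntax.
--
--     Noogle: { foo :: Type; bar :: Type; }
--     .tix:   { foo: Type, bar: Type, ... }
--     """
--     # Replace `::` inside braces with `:` and `;` with `,`
--     # We need to be careful to only do this inside `{ ... }` blocks.
--     result = []
--     depth = 0
--     i = 0
--     while i < len(expr):
--         ch = expr[i]
--         if ch == "{":
--             depth += 1
--             result.append(ch)
--             i += 1
--         elif ch == "}":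
--             depth -= 1
--             result.append(ch)
--             i += 1
--         elif depth > 0 and ch == ":" and i + 1 < len(expr) and expr[i + 1] == ":":
--             # Replace :: with :
--             result.append(":")
--             i += 2
--         elif depth > 0 and ch == ";":
--             result.append(",")
--             i += 1
--         else:
--             result.append(ch)
--             i += 1
--     return "".join(result)
-- ===== SOURCE B (Python) =====
-- def translate_record_fields(expr: str) -> str:
--     """Translate noogle record field syntax to .tix syntax.
--
--     Scan once tracking brace depth; buffer brace-free chunks and, when a
--     chunk was collected at depth > 0, rewrite it in bulk with str.replace.
--     """
--     out = []
--     buf = []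
--     depth = 0
--
--     def flush():
--         chunk = "".join(buf)
--         if depth > 0:
--             chunk = chunk.replace("::", ":").replace(";", ",")
--         out.append(chunk)
--         buf.clear()
--
--     for ch in expr:
--         if ch == "{":
--             flush()
--             out.append(ch)
--             depth += 1
--         elif ch == "}":
--             flush()
--             out.append(ch)
--             depth -= 1
--         else:
--             buf.append(ch)
--     flush()
--     return "".join(out)
-- ===== Notes on version B (the rewrite author's own statement) =====
-- stated objective: simpler
-- what changed: Replaces the index-based while loop with per-character lookahead branches by a single pass that splits the string into brace-delimited chunks and rewrites inside-brace chunks in bulk with str.replace.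
import Mathlib
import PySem

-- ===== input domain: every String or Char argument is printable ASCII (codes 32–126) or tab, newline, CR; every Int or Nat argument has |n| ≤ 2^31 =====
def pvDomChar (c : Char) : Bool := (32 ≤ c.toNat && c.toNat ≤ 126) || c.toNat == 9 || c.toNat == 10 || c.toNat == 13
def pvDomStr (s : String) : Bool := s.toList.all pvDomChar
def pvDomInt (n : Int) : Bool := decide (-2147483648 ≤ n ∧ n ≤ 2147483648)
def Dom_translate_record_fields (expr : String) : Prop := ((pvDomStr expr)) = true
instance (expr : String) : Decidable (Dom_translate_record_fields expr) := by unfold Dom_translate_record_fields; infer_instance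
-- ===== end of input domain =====

-- B replaces A's index/lookahead while-loop by a chunking pass that bulk-rewrites
-- brace-free chunks collected at depth > 0 (objective: simpler decomposition).


-- ===== PORT A =====
-- the while loop over index i, as recursion on the remaining characters;
-- the `::` branch consumes two characters (i += 2), hence `rest.tail`
def goA (depth : Int) : List Char → List Char
  | [] => []
  | c :: rest =>
    if c = '{' then c :: goA (depth + 1) rest
    else if c = '}' then c :: goA (depth - 1) rest
    else if 0 < depth ∧ c = ':' ∧ rest.head? = some ':' then
      ':' :: goA depth rest.tail
    else if 0 < depth ∧ c = ';' then ',' :: goA depth rest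
    else c :: goA depth rest
  termination_by l => l.length
  decreasing_by all_goals (simp [List.length_tail]; try omega)

def translate_record_fields (expr : String) : String :=
  String.ofList (goA 0 expr.toList)

-- ===== PORT B =====
-- chunk.replace("::", ":") : left-to-right non-overlapping replacement
def repColon : List Char → List Char
  | [] => []
  | ':' :: ':' :: rest => ':' :: repColon rest
  | c :: rest => c :: repColon rest

-- chunk.replace(";", ",")
def repSemi (l : List Char) : List Char :=
  l.map (fun c => if c = ';' then ',' else c)

-- flush(): rewrite the buffered chunk iff it was collected at depth > 0
def flushB (depth : Int) (buf : List Char) : List Char :=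
  if 0 < depth then repSemi (repColon buf) else buf

-- the for-loop over the characters, carrying the buffer of the current chunk
def goB (depth : Int) (buf : List Char) : List Char → List Char
  | [] => flushB depth buf
  | c :: rest =>
    if c = '{' then flushB depth buf ++ c :: goB (depth + 1) [] rest
    else if c = '}' then flushB depth buf ++ c :: goB (depth - 1) [] rest
    else goB depth (buf ++ [c]) rest

def translate_record_fields_alt (expr : String) : String :=
  String.ofList (goB 0 [] expr.toList)

-- ===== PRECONDITION & SPEC =====
def Spec_translate_record_fields (expr : String) (out : String) : Prop := out = translate_record_fields_alt expr
instance (expr : String) (out : String) : Decidable (Spec_translate_record_fields expr out) := by unfold Spec_translate_record_fields; infer_instance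

-- ===== CLAIM (what is proved, stated in full; the proofs are below) =====
def Claim_equal_translate_record_fields : Prop := ∀ (expr : String), Dom_translate_record_fields expr → Spec_translate_record_fields expr (translate_record_fields expr)

-- ===== LEMMAS AND PROOFS =====

-- a chunk boundary: the continuation is empty or starts with a brace
def Boundary (v : List Char) : Prop :=
  v = [] ∨ ∃ t, v = '{' :: t ∨ v = '}' :: t

-- at depth ≤ 0 A copies a brace-free chunk unchanged
lemma goA_chunk_nonpos (depth : Int) (hd : ¬ 0 < depth) :
    ∀ (u v : List Char), '{' ∉ u → '}' ∉ u →
    goA depth (u ++ v) = u ++ goA depth v := by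
  intro u
  induction u with
  | nil => intro v _ _; simp
  | cons c t ih =>
    intro v h1 h2
    simp only [List.mem_cons, not_or] at h1 h2
    simp only [List.cons_append, goA]
    rw [if_neg (fun h => h1.1 h.symm), if_neg (fun h => h2.1 h.symm),
        if_neg (by tauto), if_neg (by tauto)]
    simp [ih v h1.2 h2.2]

-- at depth > 0 A rewrites a brace-free chunk exactly as B's flush does
lemma repColon_cons (c : Char) (rest : List Char)
    (h : ∀ t, c = ':' → rest = ':' :: t → False) :
    repColon (c :: rest) = c :: repColon rest := by
  rw [repColon.eq_def]
  split
  next heq => exact absurd heq (by simp)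
  next _ r heq =>
    injection heq with e1 e2
    exact ((h r e1 e2).elim : _)
  next _ d r _ heq =>
    injection heq with e1 e2
    rw [e1, e2]

-- at depth > 0 A rewrites a brace-free chunk exactly as B's flush does
lemma goA_chunk_pos (depth : Int) (hd : 0 < depth) :
    ∀ (u v : List Char), '{' ∉ u → '}' ∉ u → Boundary v →
    goA depth (u ++ v) = repSemi (repColon u) ++ goA depth v := by
  intro u
  induction u using repColon.induct with
  | case1 => intro v _ _ _; simp [repSemi, repColon]
  | case2 rest ih =>
    intro v h1 h2 hv
    simp only [List.mem_cons, not_or] at h1 h2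
    simp only [List.cons_append]
    rw [goA]
    rw [if_neg (by decide), if_neg (by decide),
        if_pos (show 0 < depth ∧ (':' : Char) = ':' ∧
          (':' :: (rest ++ v)).head? = some ':' from ⟨hd, rfl, by simp⟩)]
    simp only [List.tail_cons, repColon, repSemi, List.map_cons]
    rw [ih v h1.2.2 h2.2.2 hv]
    simp [repSemi]
  | case3 c rest hne ih =>
    intro v h1 h2 hv
    simp only [List.mem_cons, not_or] at h1 h2
    simp only [List.cons_append]
    rw [goA]
    rw [if_neg (fun h => h1.1 h.symm), if_neg (fun h => h2.1 h.symm)]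
    have hcol : ¬ (0 < depth ∧ c = ':' ∧ (rest ++ v).head? = some ':') := by
      rintro ⟨-, rfl, hh⟩
      cases rest with
      | nil => rcases hv with rfl | ⟨t, rfl | rfl⟩ <;> simp_all
      | cons d t =>
        have hd' : d = ':' := by simpa using hh
        exact hne t rfl (by rw [hd'])
    rw [if_neg hcol, repColon_cons c rest hne]
    by_cases hsemi : c = ';'
    · subst hsemi
      rw [if_pos ⟨hd, rfl⟩]
      simp only [repSemi, List.map_cons]
      rw [ih v h1.2 h2.2 hv]
      rfl
    · rw [if_neg (by tauto)]
      simp only [repSemi, List.map_cons, if_neg hsemi]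
      rw [ih v h1.2 h2.2 hv]
      rfl

-- B's loop with a brace-free buffer equals A restarted on buffer ++ rest
lemma goB_eq_goA : ∀ (l : List Char) (depth : Int) (buf : List Char),
    '{' ∉ buf → '}' ∉ buf → goB depth buf l = goA depth (buf ++ l) := by
  intro l
  induction l with
  | nil =>
    intro depth buf h1 h2
    simp only [goB, flushB]
    by_cases hd : 0 < depth
    · rw [if_pos hd, goA_chunk_pos depth hd buf [] h1 h2 (Or.inl rfl)]
      simp [goA]
    · rw [if_neg hd, goA_chunk_nonpos depth hd buf [] h1 h2]
      simp [goA]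
  | cons c rest ih =>
    intro depth buf h1 h2
    simp only [goB]
    by_cases hb1 : c = '{'
    · subst hb1
      rw [if_pos rfl, ih (depth + 1) [] (by simp) (by simp)]
      simp only [List.nil_append, flushB]
      by_cases hd : 0 < depth
      · rw [if_pos hd,
          goA_chunk_pos depth hd buf ('{' :: rest) h1 h2 (Or.inr ⟨rest, Or.inl rfl⟩)]
        simp [goA]
      · rw [if_neg hd, goA_chunk_nonpos depth hd buf ('{' :: rest) h1 h2]
        simp [goA]
    · by_cases hb2 : c = '}'
      · subst hb2
        rw [if_neg (by decide), if_pos rfl, ih (depth - 1) [] (by simp) (by simp)]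
        simp only [List.nil_append, flushB]
        by_cases hd : 0 < depth
        · rw [if_pos hd,
            goA_chunk_pos depth hd buf ('}' :: rest) h1 h2 (Or.inr ⟨rest, Or.inr rfl⟩)]
          simp [goA]
        · rw [if_neg hd, goA_chunk_nonpos depth hd buf ('}' :: rest) h1 h2]
          simp [goA]
      · rw [if_neg hb1, if_neg hb2,
          ih depth (buf ++ [c]) (by simp [h1]; intro h; exact hb1 h.symm)
            (by simp [h2]; intro h; exact hb2 h.symm)]
        simp

-- ===== VERDICT (by name: the statement is the Claim_ definition above) =====
theorem translate_record_fields_spec : Claim_equal_translate_record_fields := by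
  intro expr _
  unfold Spec_translate_record_fields translate_record_fields translate_record_fields_alt
  rw [goB_eq_goA expr.toList 0 [] (by simp) (by simp)]
  simp
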